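-- pv_equiv track=rewrite | github.com/xlhdh/classycn | crf.py | x_seq_to_features_discrete
-- ===== SOURCE A (Python) =====
-- def x_seq_to_features_discrete(x, charstop):
--     # features are for 2 chars before and after Segmentation
--     # 1-gram and 2-gram
--     if charstop: findex = [-1,0,1,2]
--     else: findex = [-2,-1,0,1]
--
--     xf = []
--     ran = range(len(x))
--     for i in ran:
--         mydict = {}
--         # 1-gram
--         for j in findex:
--             if i+j in ran:
--                 mydict["gs"+str(j)]=x[i+j]
--
--         # 2-gram
--         for j in findex[:3]:
--             if i+j in ran and i+j+1 in ran:
--                 mydict["gd"+str(j)]=x[i+j]+x[i+j+1]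
--         xf.append(mydict)
--     return xf
-- ===== SOURCE B (Python) =====
-- def x_seq_to_features_discrete(x, charstop):
--     # Scatter traversal: instead of gathering x[i+j] for each position i, loop
--     # over source characters k and distribute each value/bigram to the target
--     # positions i = k - j that feature it.
--     if charstop: findex = [-1, 0, 1, 2]
--     else: findex = [-2, -1, 0, 1]
--     n = len(x)
--     xf = [dict() for _ in range(n)]
--     for k in range(n):
--         for j in findex:
--             i = k - j
--             if 0 <= i < n:
--                 xf[i]["gs" + str(j)] = x[k]
--     for k in range(n - 1):
--         for j in findex[:3]:
--             i = k - j
--             if 0 <= i < n: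
--                 xf[i]["gd" + str(j)] = x[k] + x[k + 1]
--     return xf
-- ===== Notes on version B (the rewrite author's own statement) =====
-- stated objective: alternative
-- what changed: B inverts A's gather loop into a scatter: it preallocates one empty dict per position and then, looping over source indices k, distributes each character x[k] (and bigram x[k]+x[k+1] in a second pass) to every target position i = k - j whose feature window contains it, instead of building each position's dict by probing x[i+j] for each offset.
import Mathlib
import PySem

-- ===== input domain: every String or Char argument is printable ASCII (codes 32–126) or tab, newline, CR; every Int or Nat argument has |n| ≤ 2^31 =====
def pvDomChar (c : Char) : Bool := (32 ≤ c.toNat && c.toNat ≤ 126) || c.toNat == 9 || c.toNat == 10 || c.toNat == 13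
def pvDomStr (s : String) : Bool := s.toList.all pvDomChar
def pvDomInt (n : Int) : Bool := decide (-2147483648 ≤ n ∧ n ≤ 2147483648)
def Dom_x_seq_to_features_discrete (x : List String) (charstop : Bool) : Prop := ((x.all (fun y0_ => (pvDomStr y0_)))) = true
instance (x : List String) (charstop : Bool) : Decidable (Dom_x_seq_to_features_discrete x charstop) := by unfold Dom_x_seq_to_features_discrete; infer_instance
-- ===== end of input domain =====

-- B inverts A's gather loop into a scatter: it preallocates one dict per position and
-- distributes each source character/bigram x[k] to the positions i = k - j that feature it;
-- objective: alternative (same cost class, inverse traversal).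

-- ===== PORT A =====
def x_seq_to_features_discrete (x : List String) (charstop : Bool) : List (List (String × String)) :=
  let findex : List Int := if charstop then [-1, 0, 1, 2] else [-2, -1, 0, 1]
  let n : Int := x.length
  let ran := PySem.List.pyRange 0 n 1
  ran.foldl (fun xf i =>
    let d1 : PySem.Dict String String :=
      findex.foldl (fun d j =>
        if i + j ∈ ran then
          d.insert ("gs" ++ PySem.Int.toStr j) (PySem.List.pyGetD x (i + j) "")
        else d) PySem.Dict.empty
    let d2 : PySem.Dict String String :=
      (findex.take 3).foldl (fun d j =>
        if i + j ∈ ran ∧ i + j + 1 ∈ ran then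
          d.insert ("gd" ++ PySem.Int.toStr j)
            (PySem.List.pyGetD x (i + j) "" ++ PySem.List.pyGetD x (i + j + 1) "")
        else d) d1
    xf ++ [d2.items]) []

-- ===== PORT B =====
-- scatter: xf[i][key] = value is List.modify at index i; the guard 0 ≤ i makes .toNat exact
def x_seq_to_features_discrete_alt (x : List String) (charstop : Bool) : List (List (String × String)) :=
  let findex : List Int := if charstop then [-1, 0, 1, 2] else [-2, -1, 0, 1]
  let n : Int := x.length
  let xf0 : List (PySem.Dict String String) := (PySem.List.pyRange 0 n 1).map (fun _ => PySem.Dict.empty)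
  let xf1 := (PySem.List.pyRange 0 n 1).foldl (fun xf k =>
    findex.foldl (fun xf j =>
      if 0 ≤ k - j ∧ k - j < n then
        xf.modify (k - j).toNat
          (fun d => d.insert ("gs" ++ PySem.Int.toStr j) (PySem.List.pyGetD x k ""))
      else xf) xf) xf0
  let xf2 := (PySem.List.pyRange 0 (n - 1) 1).foldl (fun xf k =>
    (findex.take 3).foldl (fun xf j =>
      if 0 ≤ k - j ∧ k - j < n then
        xf.modify (k - j).toNat
          (fun d => d.insert ("gd" ++ PySem.Int.toStr j)
            (PySem.List.pyGetD x k "" ++ PySem.List.pyGetD x (k + 1) ""))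
      else xf) xf) xf1
  xf2.map PySem.Dict.items

-- ===== PRECONDITION & SPEC =====
def Spec_x_seq_to_features_discrete (x : List String) (charstop : Bool) (out : List (List (String × String))) : Prop := out = x_seq_to_features_discrete_alt x charstop
instance (x : List String) (charstop : Bool) (out : List (List (String × String))) : Decidable (Spec_x_seq_to_features_discrete x charstop out) := by unfold Spec_x_seq_to_features_discrete; infer_instance

-- ===== CLAIM (what is proved, stated in full; the proofs are below) =====
def Claim_equal_x_seq_to_features_discrete : Prop := ∀ (x : List String) (charstop : Bool), Dom_x_seq_to_features_discrete x charstop → Spec_x_seq_to_features_discrete x charstop (x_seq_to_features_discrete x charstop)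

-- ===== LEMMAS AND PROOFS =====

-- filtering an integer range by an interval predicate clamps its bounds
lemma filter_pyRange_clamp (c d : Int) :
    ∀ (n : Nat) (a b : Int), (b - a).toNat = n →
      (PySem.List.pyRange a b 1).filter (fun j => decide (c ≤ j ∧ j < d))
        = PySem.List.pyRange (max a c) (min b d) 1 := by
  intro n
  induction n with
  | zero =>
    intro a b h
    rw [PySem.List.pyRange_one_eq_nil (by omega), PySem.List.pyRange_one_eq_nil (by omega)]
    rfl
  | succ m ih =>
    intro a b h
    rw [PySem.List.pyRange_one_cons (by omega)]
    by_cases hp : c ≤ a ∧ a < d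
    · have : List.filter (fun j => decide (c ≤ j ∧ j < d)) (a :: PySem.List.pyRange (a + 1) b 1)
          = a :: List.filter (fun j => decide (c ≤ j ∧ j < d)) (PySem.List.pyRange (a + 1) b 1) := by
        simp [List.filter, hp.1, hp.2]
      rw [this, ih (a + 1) b (by omega),
        PySem.List.pyRange_one_cons (a := max a c) (by omega)]
      have h1 : max a c = a := by omega
      have h2 : max (a + 1) c = a + 1 := by omega
      rw [h1, h2]
    · have : List.filter (fun j => decide (c ≤ j ∧ j < d)) (a :: PySem.List.pyRange (a + 1) b 1)
          = List.filter (fun j => decide (c ≤ j ∧ j < d)) (PySem.List.pyRange (a + 1) b 1) := by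
        simp only [List.filter]
        have : ¬ (c ≤ a ∧ a < d) := hp
        simp [this]
      rw [this, ih (a + 1) b (by omega)]
      by_cases hc : a < c
      · have : max a c = max (a + 1) c := by omega
        rw [this]
      · have hd : d ≤ a := by omega
        rw [PySem.List.pyRange_one_eq_nil (by omega), PySem.List.pyRange_one_eq_nil (by omega)]

-- same, for any predicate that is an interval test up to iff
lemma filter_pyRange_clamp' (p : Int → Prop) [DecidablePred p] (a b c d : Int)
    (hp : ∀ j, p j ↔ (c ≤ j ∧ j < d)) :
    (PySem.List.pyRange a b 1).filter (fun j => decide (p j))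
      = PySem.List.pyRange (max a c) (min b d) 1 := by
  have hfun : (fun j => decide (p j)) = fun j => decide (c ≤ j ∧ j < d) := by
    funext j
    rcases Decidable.em (p j) with h | h
    · rw [decide_eq_true h, Eq.comm, decide_eq_true ((hp j).1 h)]
    · rw [decide_eq_false h, Eq.comm, decide_eq_false (fun hc => h ((hp j).2 hc))]
  rw [hfun, filter_pyRange_clamp c d (b - a).toNat a b rfl]

-- a fold guarded by a predicate that is an interval test is the fold over the clamped range
lemma foldl_guard_clamp {σ : Type} (f : σ → Int → σ) (p : Int → Prop) [DecidablePred p]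
    (a b c d : Int) (s0 : σ) (hp : ∀ j, p j ↔ (c ≤ j ∧ j < d)) :
    (PySem.List.pyRange a b 1).foldl (fun s j => if p j then f s j else s) s0
      = (PySem.List.pyRange (max a c) (min b d) 1).foldl f s0 := by
  rw [PySem.List.foldl_ite_eq_foldl_filter, filter_pyRange_clamp' p a b c d hp]

-- a nested fold over l1 × l2 is the flat fold over the pair list
lemma nested_eq_flat {α β γ : Type} (g : β → γ → α → α) (l1 : List β) (l2 : List γ) (init : α) :
    l1.foldl (fun a k => l2.foldl (fun a j => g k j a) a) init
      = (l1.flatMap (fun k => l2.map (fun j => (k, j)))).foldl (fun a kj => g kj.1 kj.2 a) init := by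
  rw [List.foldl_flatMap]
  simp only [List.foldl_map]

-- slot i of a fold of guarded point-modifications = the fold of the modifications aimed at i
lemma getElem?_foldl_modify_guard {α β : Type} (p : β → Prop) [DecidablePred p]
    (idx : β → Nat) (f : β → α → α) :
    ∀ (l : List β) (xs : List α) (i : Nat),
    (l.foldl (fun xs b => if p b then xs.modify (idx b) (f b) else xs) xs)[i]?
      = Option.map
          (fun a => (l.filter (fun b => decide (p b) && (idx b == i))).foldl (fun a b => f b a) a)
          xs[i]? := by
  intro l
  induction l with
  | nil => intro xs i; simp
  | cons b l ih =>
    intro xs i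
    simp only [List.foldl_cons, List.filter_cons]
    by_cases hp : p b
    · by_cases hi : idx b = i
      · rw [if_pos hp, ih, List.getElem?_modify]
        cases h : xs[i]? with
        | none => simp
        | some a => simp [hp, hi]
      · rw [if_pos hp, ih, List.getElem?_modify]
        cases h : xs[i]? with
        | none => simp
        | some a => simp [hp, hi]
    · rw [if_neg hp, ih]
      simp [hp]

-- guarded point-modifications keep the list length
lemma length_foldl_modify_guard {α β : Type} (p : β → Prop) [DecidablePred p]
    (idx : β → Nat) (f : β → α → α) :
    ∀ (l : List β) (xs : List α),
    (l.foldl (fun xs b => if p b then xs.modify (idx b) (f b) else xs) xs).length = xs.length := by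
  intro l
  induction l with
  | nil => intro xs; rfl
  | cons b l ih =>
    intro xs
    simp only [List.foldl_cons]
    rw [ih]
    split_ifs with h
    · exact List.length_modify _ _ _
    · rfl

-- flatMap of an optional singleton is a filtered map
lemma flatMap_if_singleton {β γ : Type} (q : β → Prop) [DecidablePred q] (g : β → γ) (l : List β) :
    l.flatMap (fun k => if q k then [g k] else [])
      = (l.filter (fun k => decide (q k))).map g := by
  induction l with
  | nil => rfl
  | cons b l ih =>
    simp only [List.flatMap_cons, List.filter_cons]
    by_cases h : q b
    · simp [h, ih]
    · simp [h, ih]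

-- the scatter pair list filtered to one target slot m is one clamped source range
lemma filter_scatter_pairs (K base b n : Int) (m : Nat) (hm : (m : Int) < n) :
    (((PySem.List.pyRange 0 K 1).flatMap
        (fun k => (PySem.List.pyRange base b 1).map (fun j => (k, j)))).filter
      (fun kj => decide (0 ≤ kj.1 - kj.2 ∧ kj.1 - kj.2 < n) && ((kj.1 - kj.2).toNat == m)))
    = (PySem.List.pyRange (max 0 ((m : Int) + base)) (min K ((m : Int) + b)) 1).map
        (fun k => (k, k - (m : Int))) := by
  rw [List.filter_flatMap]
  have hinner : ∀ k : Int,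
      ((PySem.List.pyRange base b 1).map (fun j => (k, j))).filter
          (fun kj => decide (0 ≤ kj.1 - kj.2 ∧ kj.1 - kj.2 < n) && ((kj.1 - kj.2).toNat == m))
        = if (m : Int) + base ≤ k ∧ k < (m : Int) + b then [(k, k - (m : Int))] else [] := by
    intro k
    rw [List.filter_map]
    have hcond : ((fun kj : Int × Int =>
        decide (0 ≤ kj.1 - kj.2 ∧ kj.1 - kj.2 < n) && ((kj.1 - kj.2).toNat == m)) ∘ (fun j => (k, j)))
        = fun j => decide (k - (m : Int) ≤ j ∧ j < k - (m : Int) + 1) := by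
      funext j
      rw [Function.comp_apply, Bool.eq_iff_iff]
      simp only [Bool.and_eq_true, decide_eq_true_eq, beq_iff_eq]
      omega
    rw [hcond, filter_pyRange_clamp (k - (m : Int)) (k - (m : Int) + 1) (b - base).toNat base b rfl]
    by_cases h : (m : Int) + base ≤ k ∧ k < (m : Int) + b
    · have h1 : max base (k - (m : Int)) = k - (m : Int) := by omega
      have h2 : min b (k - (m : Int) + 1) = k - (m : Int) + 1 := by omega
      rw [h1, h2, PySem.List.pyRange_one_singleton, if_pos h]
      rfl
    · rw [PySem.List.pyRange_one_eq_nil (by omega), if_neg h]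
      rfl
  have : ∀ k ∈ PySem.List.pyRange 0 K 1,
      ((PySem.List.pyRange base b 1).map (fun j => (k, j))).filter
          (fun kj => decide (0 ≤ kj.1 - kj.2 ∧ kj.1 - kj.2 < n) && ((kj.1 - kj.2).toNat == m))
        = if (m : Int) + base ≤ k ∧ k < (m : Int) + b then [(k, k - (m : Int))] else [] :=
    fun k _ => hinner k
  rw [List.flatMap_congr this,
    flatMap_if_singleton (fun k => (m : Int) + base ≤ k ∧ k < (m : Int) + b)
      (fun k => (k, k - (m : Int))) _,
    filter_pyRange_clamp' _ 0 K ((m : Int) + base) ((m : Int) + b) (fun k => Iff.rfl)]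

-- shifting the range of a fold by t
lemma foldl_pyRange_shift {σ : Type} (h : σ → Int → σ) (t : Int) :
    ∀ (N : Nat) (a b : Int), (b - a).toNat = N → ∀ s : σ,
      (PySem.List.pyRange a b 1).foldl h s
        = (PySem.List.pyRange (a + t) (b + t) 1).foldl (fun s k => h s (k - t)) s := by
  intro N
  induction N with
  | zero =>
    intro a b hN s
    rw [PySem.List.pyRange_one_eq_nil (by omega), PySem.List.pyRange_one_eq_nil (by omega)]
    rfl
  | succ M ih =>
    intro a b hN s
    rw [PySem.List.pyRange_one_cons (by omega), PySem.List.pyRange_one_cons (a := a + t) (by omega)]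
    simp only [List.foldl_cons]
    have harg : a + t - t = a := by omega
    rw [harg]
    have : a + t + 1 = a + 1 + t := by omega
    rw [this]
    exact ih (a + 1) b (by omega) (h s a)

-- slot m of one scatter pass, as a fold over the clamped source range
lemma scatter_pass_getElem {α : Type} (K base b n : Int) (f : Int → Int → α → α)
    (xs : List α) (m : Nat) (hm : (m : Int) < n) :
    ((PySem.List.pyRange 0 K 1).foldl (fun xf k =>
        (PySem.List.pyRange base b 1).foldl (fun xf j =>
          if 0 ≤ k - j ∧ k - j < n then xf.modify (k - j).toNat (f k j) else xf) xf) xs)[m]?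
      = Option.map
          (fun a => (PySem.List.pyRange (max 0 ((m : Int) + base)) (min K ((m : Int) + b)) 1).foldl
              (fun a k => f k (k - (m : Int)) a) a)
          xs[m]? := by
  rw [nested_eq_flat (g := fun k j (xf : List α) =>
      if 0 ≤ k - j ∧ k - j < n then xf.modify (k - j).toNat (f k j) else xf),
    getElem?_foldl_modify_guard (p := fun kj : Int × Int => 0 ≤ kj.1 - kj.2 ∧ kj.1 - kj.2 < n)
      (idx := fun kj => (kj.1 - kj.2).toNat) (f := fun kj => f kj.1 kj.2),
    filter_scatter_pairs K base b n m hm]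
  simp only [List.foldl_map]

-- a scatter pass keeps the list length
lemma scatter_pass_length {α : Type} (K base b n : Int) (f : Int → Int → α → α) (xs : List α) :
    ((PySem.List.pyRange 0 K 1).foldl (fun xf k =>
        (PySem.List.pyRange base b 1).foldl (fun xf j =>
          if 0 ≤ k - j ∧ k - j < n then xf.modify (k - j).toNat (f k j) else xf) xf) xs).length
      = xs.length := by
  rw [nested_eq_flat (g := fun k j (xf : List α) =>
      if 0 ≤ k - j ∧ k - j < n then xf.modify (k - j).toNat (f k j) else xf)]
  exact length_foldl_modify_guard _ _ _ _ _

-- the whole computation, generic in the offset base (-1 for charstop, -2 otherwise)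
lemma core_eq (x : List String) (base : Int) :
    (PySem.List.pyRange 0 (x.length : Int) 1).foldl (fun xf i =>
      xf ++ [((PySem.List.pyRange base (base + 3) 1).foldl (fun d j =>
          if i + j ∈ PySem.List.pyRange 0 (x.length : Int) 1
              ∧ i + j + 1 ∈ PySem.List.pyRange 0 (x.length : Int) 1 then
            d.insert ("gd" ++ PySem.Int.toStr j)
              (PySem.List.pyGetD x (i + j) "" ++ PySem.List.pyGetD x (i + j + 1) "")
          else d)
        ((PySem.List.pyRange base (base + 4) 1).foldl (fun d j =>
          if i + j ∈ PySem.List.pyRange 0 (x.length : Int) 1 then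
            d.insert ("gs" ++ PySem.Int.toStr j) (PySem.List.pyGetD x (i + j) "")
          else d) PySem.Dict.empty)).items]) []
    = ((PySem.List.pyRange 0 ((x.length : Int) - 1) 1).foldl (fun xf k =>
        (PySem.List.pyRange base (base + 3) 1).foldl (fun xf j =>
          if 0 ≤ k - j ∧ k - j < (x.length : Int) then
            xf.modify (k - j).toNat
              (fun d => d.insert ("gd" ++ PySem.Int.toStr j)
                (PySem.List.pyGetD x k "" ++ PySem.List.pyGetD x (k + 1) ""))
          else xf) xf)
      ((PySem.List.pyRange 0 (x.length : Int) 1).foldl (fun xf k =>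
        (PySem.List.pyRange base (base + 4) 1).foldl (fun xf j =>
          if 0 ≤ k - j ∧ k - j < (x.length : Int) then
            xf.modify (k - j).toNat
              (fun d => d.insert ("gs" ++ PySem.Int.toStr j) (PySem.List.pyGetD x k ""))
          else xf) xf)
        ((PySem.List.pyRange 0 (x.length : Int) 1).map (fun _ => PySem.Dict.empty)))).map
      PySem.Dict.items := by
  have hn0 : (0 : Int) ≤ (x.length : Int) := Int.natCast_nonneg _
  rw [PySem.List.foldl_append_singleton_eq_map, List.nil_append]
  apply List.ext_getElem?
  intro m
  by_cases hmx : m < x.length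
  · have hm : ((m : Nat) : Int) < (x.length : Int) := by exact_mod_cast hmx
    rw [List.getElem?_map, List.getElem?_map, PySem.List.getElem?_pyRange_one,
      scatter_pass_getElem ((x.length : Int) - 1) base (base + 3) (x.length : Int)
        (fun k j => fun d : PySem.Dict String String => d.insert ("gd" ++ PySem.Int.toStr j)
          (PySem.List.pyGetD x k "" ++ PySem.List.pyGetD x (k + 1) "")) _ m hm,
      scatter_pass_getElem (x.length : Int) base (base + 4) (x.length : Int)
        (fun k j => fun d : PySem.Dict String String => d.insert ("gs" ++ PySem.Int.toStr j) (PySem.List.pyGetD x k "")) _ m hm,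
      List.getElem?_map, PySem.List.getElem?_pyRange_one]
    have hlt : m < ((x.length : Int) - 0).toNat := by omega
    rw [if_pos hlt]
    simp only [Option.map_some, zero_add]
    have hk : ∀ k : Int, ((m : Nat) : Int) + (k - ((m : Nat) : Int)) = k := fun k => by omega
    have hD1 :
        (PySem.List.pyRange base (base + 4) 1).foldl (fun d j =>
            if ((m : Nat) : Int) + j ∈ PySem.List.pyRange 0 (x.length : Int) 1 then
              d.insert ("gs" ++ PySem.Int.toStr j)
                (PySem.List.pyGetD x (((m : Nat) : Int) + j) "")
            else d) PySem.Dict.empty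
          = (PySem.List.pyRange (max 0 (((m : Nat) : Int) + base))
                (min (x.length : Int) (((m : Nat) : Int) + (base + 4))) 1).foldl
              (fun a k => a.insert ("gs" ++ PySem.Int.toStr (k - ((m : Nat) : Int)))
                (PySem.List.pyGetD x k "")) PySem.Dict.empty := by
      rw [foldl_guard_clamp
            (fun d j => d.insert ("gs" ++ PySem.Int.toStr j)
              (PySem.List.pyGetD x (((m : Nat) : Int) + j) ""))
            (fun j => ((m : Nat) : Int) + j ∈ PySem.List.pyRange 0 (x.length : Int) 1)
            base (base + 4) (-((m : Nat) : Int)) ((x.length : Int) - ((m : Nat) : Int))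
            PySem.Dict.empty
            (by intro j; simp only [PySem.List.mem_pyRange_one]; omega),
        foldl_pyRange_shift _ ((m : Nat) : Int)
          ((min (base + 4) ((x.length : Int) - ((m : Nat) : Int))
            - max base (-((m : Nat) : Int))).toNat) _ _ rfl]
      have e1 : max base (-((m : Nat) : Int)) + ((m : Nat) : Int)
          = max 0 (((m : Nat) : Int) + base) := by omega
      have e2 : min (base + 4) ((x.length : Int) - ((m : Nat) : Int)) + ((m : Nat) : Int)
          = min (x.length : Int) (((m : Nat) : Int) + (base + 4)) := by omega
      rw [e1, e2]
      apply PySem.List.foldl_congr_mem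
      intro acc k _
      simp only [hk]
    have hD2 : ∀ d0 : PySem.Dict String String,
        (PySem.List.pyRange base (base + 3) 1).foldl (fun d j =>
            if ((m : Nat) : Int) + j ∈ PySem.List.pyRange 0 (x.length : Int) 1
                ∧ ((m : Nat) : Int) + j + 1 ∈ PySem.List.pyRange 0 (x.length : Int) 1 then
              d.insert ("gd" ++ PySem.Int.toStr j)
                (PySem.List.pyGetD x (((m : Nat) : Int) + j) ""
                  ++ PySem.List.pyGetD x (((m : Nat) : Int) + j + 1) "")
            else d) d0
          = (PySem.List.pyRange (max 0 (((m : Nat) : Int) + base))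
                (min ((x.length : Int) - 1) (((m : Nat) : Int) + (base + 3))) 1).foldl
              (fun a k => a.insert ("gd" ++ PySem.Int.toStr (k - ((m : Nat) : Int)))
                (PySem.List.pyGetD x k "" ++ PySem.List.pyGetD x (k + 1) "")) d0 := by
      intro d0
      rw [foldl_guard_clamp
            (fun d j => d.insert ("gd" ++ PySem.Int.toStr j)
              (PySem.List.pyGetD x (((m : Nat) : Int) + j) ""
                ++ PySem.List.pyGetD x (((m : Nat) : Int) + j + 1) ""))
            (fun j => ((m : Nat) : Int) + j ∈ PySem.List.pyRange 0 (x.length : Int) 1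
                ∧ ((m : Nat) : Int) + j + 1 ∈ PySem.List.pyRange 0 (x.length : Int) 1)
            base (base + 3) (-((m : Nat) : Int)) ((x.length : Int) - 1 - ((m : Nat) : Int)) d0
            (by intro j; simp only [PySem.List.mem_pyRange_one]; omega),
        foldl_pyRange_shift _ ((m : Nat) : Int)
          ((min (base + 3) ((x.length : Int) - 1 - ((m : Nat) : Int))
            - max base (-((m : Nat) : Int))).toNat) _ _ rfl]
      have e1 : max base (-((m : Nat) : Int)) + ((m : Nat) : Int)
          = max 0 (((m : Nat) : Int) + base) := by omega
      have e2 : min (base + 3) ((x.length : Int) - 1 - ((m : Nat) : Int)) + ((m : Nat) : Int)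
          = min ((x.length : Int) - 1) (((m : Nat) : Int) + (base + 3)) := by omega
      rw [e1, e2]
      apply PySem.List.foldl_congr_mem
      intro acc k _
      simp only [hk]
    rw [hD1, hD2]
  · have hge : x.length ≤ m := Nat.le_of_not_lt hmx
    rw [List.getElem?_eq_none, List.getElem?_eq_none]
    · rw [List.length_map, scatter_pass_length, scatter_pass_length, List.length_map,
        PySem.List.length_pyRange_one]
      omega
    · rw [List.length_map, PySem.List.length_pyRange_one]
      omega

-- ===== VERDICT (by name: the statement is the Claim_ definition above) =====
theorem x_seq_to_features_discrete_spec : Claim_equal_x_seq_to_features_discrete := by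
  intro x charstop _
  unfold Spec_x_seq_to_features_discrete
  cases charstop
  · show x_seq_to_features_discrete x false = x_seq_to_features_discrete_alt x false
    simp only [x_seq_to_features_discrete, x_seq_to_features_discrete_alt, if_false,
      Bool.false_eq_true]
    rw [show ([-2, -1, 0, 1] : List Int) = PySem.List.pyRange (-2) ((-2) + 4) 1 from by decide,
      show (PySem.List.pyRange (-2) ((-2) + 4) 1).take 3 = PySem.List.pyRange (-2) ((-2) + 3) 1 from by decide]
    exact core_eq x (-2)
  · show x_seq_to_features_discrete x true = x_seq_to_features_discrete_alt x true
    simp only [x_seq_to_features_discrete, x_seq_to_features_discrete_alt, if_true]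
    rw [show ([-1, 0, 1, 2] : List Int) = PySem.List.pyRange (-1) ((-1) + 4) 1 from by decide,
      show (PySem.List.pyRange (-1) ((-1) + 4) 1).take 3 = PySem.List.pyRange (-1) ((-1) + 3) 1 from by decide]
    exact core_eq x (-1)
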